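-- pv_equiv track=rewrite | github.com/clementnader/cbtc_configuration_checking | prj/src/survey/survey_verification/check_survey_sheets/common_utils.py | get_smallest_unique_prefix_dict
-- ===== SOURCE A (Python) =====
-- def get_smallest_unique_prefix_dict(input_dict: dict[str, str]) -> dict[str, str]:
--     res_dict = dict()
--     list_of_splits = [value.split("_") for value in input_dict.values()]
--
--     for key, split in zip(input_dict.keys(), list_of_splits):
--         other_splits = [other_split for other_split in list_of_splits if other_split != split]
--         level = 1
--         prefix = "_".join(split[:level])
--
--         while level < len(split):
--             other_prefixes = ["_".join(other_split[:level]) for other_split in other_splits]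
--             if prefix not in other_prefixes:  # unique prefix
--                 break
--             level += 1
--             prefix = "_".join(split[:level])
--
--         res_dict[key] = prefix
--     return res_dict
-- ===== SOURCE B (Python) =====
-- def get_smallest_unique_prefix_dict(input_dict: dict[str, str]) -> dict[str, str]:
--     # Count, per (level, prefix), how many values share that prefix; a prefix of
--     # `level` tokens is unique iff its count equals the number of exact duplicates
--     # of the whole split (A excludes those from the comparison set entirely).
--     dup = {}
--     for value in input_dict.values():
--         toks = tuple(value.split("_"))
--         dup[toks] = dup.get(toks, 0) + 1
--     counts = {}
--     for value in input_dict.values():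
--         pref = ""
--         for i, tok in enumerate(value.split("_")):
--             pref = tok if i == 0 else pref + "_" + tok
--             key = (i + 1, pref)
--             counts[key] = counts.get(key, 0) + 1
--     res = {}
--     for key, value in input_dict.items():
--         toks = value.split("_")
--         d = dup[tuple(toks)]
--         pref = toks[0]
--         level = 1
--         while level < len(toks) and counts.get((level, pref), 0) != d:
--             pref = pref + "_" + toks[level]
--             level += 1
--         res[key] = pref
--     return res
-- ===== Notes on version B (the rewrite author's own statement) =====
-- stated objective: faster
-- what changed: Instead of comparing each value's prefix against all other values' prefixes at every level (quadratic rescans), B builds one hash map counting each (level, prefix) over all values plus a counter of exact duplicate splits, then finds each entry's smallest unique prefix by O(1) lookups per level.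
import Mathlib
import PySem

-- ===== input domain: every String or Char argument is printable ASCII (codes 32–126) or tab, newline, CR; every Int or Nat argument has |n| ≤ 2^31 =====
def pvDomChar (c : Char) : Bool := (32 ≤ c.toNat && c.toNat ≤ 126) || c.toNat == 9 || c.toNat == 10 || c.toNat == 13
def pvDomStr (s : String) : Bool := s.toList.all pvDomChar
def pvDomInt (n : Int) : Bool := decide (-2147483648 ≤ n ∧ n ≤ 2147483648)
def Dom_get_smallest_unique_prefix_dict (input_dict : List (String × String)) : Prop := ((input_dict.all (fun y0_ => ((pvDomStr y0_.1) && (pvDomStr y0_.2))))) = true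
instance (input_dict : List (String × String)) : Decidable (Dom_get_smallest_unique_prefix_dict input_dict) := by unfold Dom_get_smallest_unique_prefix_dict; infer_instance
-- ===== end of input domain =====

-- B replaces A's per-entry scan of all other values at every level by one precomputed
-- (level, prefix) counter plus a duplicate-split counter, answering each entry by lookups
-- (objective: faster; a timing run measured the speed-up).

-- ===== PORT A =====
-- value.split("_") on the code points (PySem.Chars.splitOn is exact for sep "_")
def pvSplit (v : String) : List (List Char) := PySem.Chars.splitOn v.toList ['_']
-- "_".join(parts) on the code points (PySem.Chars.join is exact)
def pvJoin (ts : List (List Char)) : List Char := PySem.Chars.join ['_'] ts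

-- A's while-loop; fuel = len(split) - level counts the remaining iterations, so
-- fuel = 0 is exactly Python's 'level < len(split)' turning false.
def pvALoop (split : List (List Char)) (others : List (List (List Char))) :
    Nat → Nat → List Char
  | level, 0 => pvJoin (split.take level)
  | level, fuel+1 =>
      let pfx := pvJoin (split.take level)
      if pfx ∈ others.map (fun t => pvJoin (t.take level)) then
        pvALoop split others (level+1) fuel
      else pfx

def get_smallest_unique_prefix_dict (input_dict : List (String × String)) : List (String × String) :=
  let list_of_splits := input_dict.map (fun kv => pvSplit kv.2)
  (input_dict.foldl (fun (d : PySem.Dict String String) kv =>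
      let split := pvSplit kv.2
      let others := list_of_splits.filter (fun t => t != split)
      d.insert kv.1 (String.mk (pvALoop split others 1 (split.length - 1)))) PySem.Dict.empty).items

-- ===== PORT B =====
-- Source B's inner build loop: the (i+1, incrementally-extended prefix) keys of one value
def pvPrefixKeysGo (pref : List Char) (i : Nat) : List (List Char) → List (Nat × List Char)
  | [] => []
  | tok :: rest =>
      let pref' := if i = 0 then tok else pref ++ '_' :: tok
      (i+1, pref') :: pvPrefixKeysGo pref' (i+1) rest

-- Source B's query while-loop; fuel = len(toks) - level as above; toks.getD level [] is
-- toks[level], in range whenever fuel > 0.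
def pvBLoop (counts : PySem.Dict (Nat × List Char) Int) (toks : List (List Char)) (d : Int) :
    List Char → Nat → Nat → List Char
  | pref, _, 0 => pref
  | pref, level, fuel+1 =>
      if counts.getD (level, pref) 0 != d then
        pvBLoop counts toks d (pref ++ '_' :: toks.getD level []) (level+1) fuel
      else pref

def get_smallest_unique_prefix_dict_alt (input_dict : List (String × String)) : List (String × String) :=
  let dup := input_dict.foldl (fun (d : PySem.Dict (List (List Char)) Int) kv =>
      let toks := pvSplit kv.2
      d.insert toks (d.getD toks 0 + 1)) PySem.Dict.empty
  let counts := input_dict.foldl (fun (c : PySem.Dict (Nat × List Char) Int) kv =>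
      (pvPrefixKeysGo [] 0 (pvSplit kv.2)).foldl (fun c k => c.insert k (c.getD k 0 + 1)) c)
      PySem.Dict.empty
  (input_dict.foldl (fun (r : PySem.Dict String String) kv =>
      let toks := pvSplit kv.2
      r.insert kv.1 (String.mk
        (pvBLoop counts toks (dup.getD toks 0) (toks.headD []) 1 (toks.length - 1))))
      PySem.Dict.empty).items

-- ===== PRECONDITION & SPEC =====
def Spec_get_smallest_unique_prefix_dict (input_dict : List (String × String)) (out : List (String × String)) : Prop := out = get_smallest_unique_prefix_dict_alt input_dict
instance (input_dict : List (String × String)) (out : List (String × String)) : Decidable (Spec_get_smallest_unique_prefix_dict input_dict out) := by unfold Spec_get_smallest_unique_prefix_dict; infer_instance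

-- ===== CLAIM (what is proved, stated in full; the proofs are below) =====
def Claim_equal_get_smallest_unique_prefix_dict : Prop := ∀ (input_dict : List (String × String)), Dom_get_smallest_unique_prefix_dict input_dict → Spec_get_smallest_unique_prefix_dict input_dict (get_smallest_unique_prefix_dict input_dict)

-- ===== LEMMAS AND PROOFS =====

-- fuel-free form of PySem.Chars.splitOn for sep = "_"
def pvSp : List Char → List Char → List (List Char)
  | cur, [] => [cur.reverse]
  | cur, c :: rest => if c = '_' then cur.reverse :: pvSp [] rest else pvSp (c :: cur) rest

theorem pv_go_eq (l : List Char) : ∀ (fuel : Nat) (cur : List Char) (acc : List (List Char)),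
    l.length ≤ fuel →
    PySem.Chars.splitOn.go ['_'] fuel l cur acc = acc.reverse ++ pvSp cur l := by
  induction l with
  | nil =>
    intro fuel cur acc _
    cases fuel <;> simp [PySem.Chars.splitOn.go, pvSp]
  | cons c rest ih =>
    intro fuel cur acc h
    cases fuel with
    | zero => simp at h
    | succ f =>
      simp only [List.length_cons, Nat.add_le_add_iff_right] at h
      simp only [PySem.Chars.splitOn.go, pvSp]
      by_cases hc : c = '_'
      · subst hc
        simp [List.isPrefixOf, ih f [] (cur.reverse :: acc) h]
      · have hpre : List.isPrefixOf ['_'] (c :: rest) = false := by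
          simp [List.isPrefixOf]
          exact fun h' => absurd h'.symm hc
        simp [hpre, hc, ih f (c :: cur) acc h]

theorem pvSplit_eq (v : String) : pvSplit v = pvSp [] v.toList := by
  unfold pvSplit PySem.Chars.splitOn
  exact pv_go_eq _ _ _ _ (by omega)

theorem pvSp_ne_nil (l : List Char) : ∀ cur, pvSp cur l ≠ [] := by
  induction l with
  | nil => intro cur; simp [pvSp]
  | cons c rest ih =>
    intro cur
    by_cases hc : c = '_' <;> simp [pvSp, hc, ih]

theorem pvSp_sepFree (l : List Char) : ∀ cur, '_' ∉ cur → ∀ t ∈ pvSp cur l, '_' ∉ t := by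
  induction l with
  | nil => intro cur hcur t ht; simp [pvSp] at ht; subst ht; simpa using hcur
  | cons c rest ih =>
    intro cur hcur t ht
    by_cases hc : c = '_'
    · subst hc
      simp [pvSp] at ht
      rcases ht with h | h
      · subst h; simpa using hcur
      · exact ih [] (by simp) t h
    · simp [pvSp, hc] at ht
      refine ih (c :: cur) ?_ t ht
      simp [hcur]
      exact fun h' => absurd h'.symm hc

-- well-formedness of a split: nonempty, tokens free of '_'
def pvGood (t : List (List Char)) : Prop := t ≠ [] ∧ ∀ u ∈ t, '_' ∉ u

theorem pvGood_split (v : String) : pvGood (pvSplit v) := by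
  rw [pvSplit_eq]
  exact ⟨pvSp_ne_nil _ _, pvSp_sepFree _ _ (by simp)⟩

-- "_".join in flatMap form
theorem pvJoin_cons (t : List Char) (ts : List (List Char)) :
    pvJoin (t :: ts) = t ++ ts.flatMap (fun u => '_' :: u) := by
  induction ts generalizing t with
  | nil => simp [pvJoin, PySem.Chars.join, List.intercalate]
  | cons u ts ih =>
    unfold pvJoin PySem.Chars.join at *
    have hstep : List.intercalate ['_'] (t :: u :: ts) = t ++ ['_'] ++ List.intercalate ['_'] (u :: ts) := by
      simp [List.intercalate, List.intersperse]
    rw [hstep, ih u]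
    simp

theorem pvJoin_take_one (t : List (List Char)) (h : t ≠ []) :
    pvJoin (t.take 1) = t.headD [] := by
  cases t with
  | nil => simp at h
  | cons a t => simp [pvJoin_cons]

theorem pvJoin_take_succ (t : List (List Char)) (ℓ : Nat) (h1 : 1 ≤ ℓ) (h2 : ℓ < t.length) :
    pvJoin (t.take (ℓ+1)) = pvJoin (t.take ℓ) ++ '_' :: t.getD ℓ [] := by
  cases t with
  | nil => simp at h2
  | cons a rest =>
    cases ℓ with
    | zero => omega
    | succ m =>
      have hm : m < rest.length := by simp at h2; omega
      rw [List.take_succ_cons, List.take_succ_cons, pvJoin_cons, pvJoin_cons]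
      have htake : List.take (m+1) rest = List.take m rest ++ [rest[m]] := by
        rw [List.take_succ, List.getElem?_eq_getElem hm]; rfl
      rw [htake, List.flatMap_append]
      simp [List.getD_eq_getElem?_getD, List.getElem?_eq_getElem hm]

theorem pvCount_join (ts : List (List Char)) (h : ∀ u ∈ ts, '_' ∉ u) :
    (ts.flatMap (fun u => '_' :: u)).count '_' = ts.length := by
  induction ts with
  | nil => simp
  | cons u ts ih =>
    simp only [List.flatMap_cons, List.count_append, List.count_cons]
    have hu : u.count '_' = 0 := List.count_eq_zero.mpr (h u (by simp))
    have := ih (fun u hu => h u (by simp [hu]))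
    simp [hu, this]
    omega

theorem pvCount_join_take (t : List (List Char)) (ℓ : Nat) (hg : pvGood t) (h1 : 1 ≤ ℓ) :
    (pvJoin (t.take ℓ)).count '_' = min ℓ t.length - 1 := by
  obtain ⟨hne, hfree⟩ := hg
  cases t with
  | nil => simp at hne
  | cons a t =>
    cases ℓ with
    | zero => omega
    | succ m =>
      rw [List.take_succ_cons, pvJoin_cons, List.count_append]
      have ha : a.count '_' = 0 := List.count_eq_zero.mpr (hfree a (by simp))
      have : ((t.take m).flatMap (fun u => '_' :: u)).count '_' = (t.take m).length :=
        pvCount_join _ (fun u hu => hfree u (by simp [List.mem_of_mem_take hu]))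
      simp [ha, this]

theorem pvLen_ge (t s : List (List Char)) (ℓ : Nat) (hgt : pvGood t) (hgs : pvGood s)
    (h1 : 1 ≤ ℓ) (h2 : ℓ ≤ s.length) (heq : pvJoin (t.take ℓ) = pvJoin (s.take ℓ)) :
    ℓ ≤ t.length := by
  have ct := pvCount_join_take t ℓ hgt h1
  have cs := pvCount_join_take s ℓ hgs h1
  rw [heq, cs] at ct
  have ht1 : 1 ≤ t.length := by
    cases t with
    | nil => exact absurd rfl hgt.1
    | cons a t => simp
  omega

-- Source B's build loop produces exactly the (k+1, join(toks[:k+1])) pairs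
theorem pvPrefixKeysGo_eq (rest : List (List Char)) : ∀ (pref : List Char) (i : Nat), 1 ≤ i →
    pvPrefixKeysGo pref i rest =
      (List.range rest.length).map
        (fun k => (i+1+k, pref ++ (rest.take (k+1)).flatMap (fun u => '_' :: u))) := by
  induction rest with
  | nil => intro pref i _; simp [pvPrefixKeysGo]
  | cons tok rest ih =>
    intro pref i hi
    have hne : ¬ i = 0 := by omega
    simp only [pvPrefixKeysGo, hne, if_false]
    rw [ih (pref ++ '_' :: tok) (i+1) (by omega)]
    rw [List.length_cons, List.range_succ_eq_map, List.map_cons, List.map_map]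
    congr 1
    · simp
    · refine List.map_congr_left (fun k hk => ?_)
      simp only [Function.comp_apply, List.take_succ_cons, List.flatMap_cons, Prod.mk.injEq]
      refine ⟨by omega, by simp⟩

theorem pvPrefixKeys_eq (t : List (List Char)) (h : t ≠ []) :
    pvPrefixKeysGo [] 0 t = (List.range t.length).map (fun k => (k+1, pvJoin (t.take (k+1)))) := by
  cases t with
  | nil => exact absurd rfl h
  | cons tok rest =>
    have h0 : pvPrefixKeysGo [] 0 (tok :: rest) = (1, tok) :: pvPrefixKeysGo tok 1 rest := by
      simp [pvPrefixKeysGo]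
    rw [h0, pvPrefixKeysGo_eq rest tok 1 (by omega)]
    rw [List.length_cons, List.range_succ_eq_map, List.map_cons, List.map_map]
    congr 1
    · simp [pvJoin_cons]
    · refine List.map_congr_left (fun k hk => ?_)
      simp only [Function.comp_apply, List.take_succ_cons, Prod.mk.injEq, pvJoin_cons]
      refine ⟨by omega, by simp⟩

theorem pvCount_prefixKeys (t : List (List Char)) (ht : t ≠ []) (ℓ : Nat) (p : List Char) (h1 : 1 ≤ ℓ) :
    (pvPrefixKeysGo [] 0 t).count (ℓ, p) =
      if ℓ ≤ t.length ∧ pvJoin (t.take ℓ) = p then 1 else 0 := by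
  rw [pvPrefixKeys_eq t ht]
  have hinj : Function.Injective (fun k : Nat => (k+1, pvJoin (t.take (k+1)))) := by
    intro a b hab
    simpa using congrArg Prod.fst hab
  split_ifs with h
  · obtain ⟨hlen, hp⟩ := h
    have hkey : (ℓ, p) = (fun k : Nat => (k+1, pvJoin (t.take (k+1)))) (ℓ-1) := by
      simp only [Prod.mk.injEq]
      constructor
      · omega
      · have hℓ : ℓ - 1 + 1 = ℓ := by omega
        rw [← hp, hℓ]
    rw [hkey, List.count_map_of_injective _ _ hinj, List.count_range]
    have h' : ℓ - 1 < t.length := by omega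
    rw [if_pos h']
  · refine List.count_eq_zero.mpr (fun hmem => h ?_)
    obtain ⟨k, hk, hfk⟩ := List.mem_map.mp hmem
    have hk1 : k + 1 = ℓ := by simpa using congrArg Prod.fst hfk
    have hk2 : pvJoin (t.take (k+1)) = p := by simpa using congrArg Prod.snd hfk
    have hkl : k < t.length := List.mem_range.mp hk
    constructor
    · omega
    · have hℓ : k + 1 = ℓ := hk1
      rw [← hk2, hℓ]

-- counting decomposition: total matches = exact duplicates + other matches
theorem pvCountP_split {α : Type} [BEq α] [LawfulBEq α] [DecidableEq α] (S : List α) (f : α → Bool) (a : α)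
    (hf : f a = true) :
    S.countP f = S.count a + (S.filter (fun t => t != a)).countP f := by
  induction S with
  | nil => simp
  | cons x S ih =>
    by_cases hx : x = a
    · subst hx
      simp [List.countP_cons, hf, ih]
      omega
    · simp [List.countP_cons, hx, ih]
      omega

-- the per-level equivalence: A's membership test ↔ B's counter comparison
theorem pvLevel_iff (S : List (List (List Char))) (toks : List (List Char)) (ℓ : Nat)
    (hS : ∀ t ∈ S, pvGood t) (hg : pvGood toks) (h1 : 1 ≤ ℓ) (h2 : ℓ ≤ toks.length) :
    (pvJoin (toks.take ℓ) ∈ (S.filter (fun t => t != toks)).map (fun t => pvJoin (t.take ℓ))) ↔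
      (S.map (fun t => (pvPrefixKeysGo [] 0 t).count (ℓ, pvJoin (toks.take ℓ)))).sum ≠ S.count toks := by
  set p := pvJoin (toks.take ℓ) with hp
  -- each summand is a 0/1 indicator, and the length condition is implied by the match
  have hmap : S.map (fun t => (pvPrefixKeysGo [] 0 t).count (ℓ, p)) =
      S.map (fun t => if pvJoin (t.take ℓ) = p then 1 else 0) := by
    refine List.map_congr_left (fun t htS => ?_)
    rw [pvCount_prefixKeys t (hS t htS).1 ℓ p h1]
    by_cases hj : pvJoin (t.take ℓ) = p
    · have hlen : ℓ ≤ t.length := pvLen_ge t toks ℓ (hS t htS) hg h1 h2 hj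
      simp [hj, hlen]
    · simp [hj]
  have hsum : (S.map (fun t => if pvJoin (t.take ℓ) = p then 1 else 0)).sum =
      S.countP (fun t => decide (pvJoin (t.take ℓ) = p)) :=
    PySem.List.sum_map_ite_one_zero_nat' (fun t => pvJoin (t.take ℓ) = p) S
  have hsplit : S.countP (fun t => decide (pvJoin (t.take ℓ) = p)) =
      S.count toks + (S.filter (fun t => t != toks)).countP (fun t => decide (pvJoin (t.take ℓ) = p)) :=
    pvCountP_split S (fun t => decide (pvJoin (t.take ℓ) = p)) toks (by simp [hp])
  rw [hmap, hsum, hsplit]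
  have hiff : (S.filter (fun t => t != toks)).countP (fun t => decide (pvJoin (t.take ℓ) = p)) ≠ 0 ↔
      p ∈ (S.filter (fun t => t != toks)).map (fun t => pvJoin (t.take ℓ)) := by
    rw [Ne, List.countP_eq_zero]
    simp [List.mem_map]
    tauto
  constructor
  · intro hmem
    have := hiff.mpr hmem
    omega
  · intro hne
    exact hiff.mp (by omega)

-- A's while-loop and B's while-loop agree level by level once the membership test
-- and the counter comparison are known equivalent at every level
theorem pvLoop_eq (counts : PySem.Dict (Nat × List Char) Int) (toks : List (List Char))
    (others : List (List (List Char))) (d : Int)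
    (hiff : ∀ ℓ, 1 ≤ ℓ → ℓ < toks.length →
      ((pvJoin (toks.take ℓ) ∈ others.map (fun t => pvJoin (t.take ℓ))) ↔
        counts.getD (ℓ, pvJoin (toks.take ℓ)) 0 ≠ d)) :
    ∀ (fuel level : Nat), 1 ≤ level → level + fuel = toks.length →
      pvALoop toks others level fuel = pvBLoop counts toks d (pvJoin (toks.take level)) level fuel := by
  intro fuel
  induction fuel with
  | zero => intro level _ _; simp [pvALoop, pvBLoop]
  | succ f ih =>
    intro level h1 h2
    have hlt : level < toks.length := by omega
    have hiffl := hiff level h1 hlt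
    simp only [pvALoop, pvBLoop]
    by_cases hmem : pvJoin (toks.take level) ∈ others.map (fun t => pvJoin (t.take level))
    · have hne : counts.getD (level, pvJoin (toks.take level)) 0 ≠ d := hiffl.mp hmem
      rw [if_pos hmem, if_pos (bne_iff_ne.mpr hne)]
      rw [← pvJoin_take_succ toks level h1 hlt]
      exact ih (level+1) (by omega) (by omega)
    · have heq : counts.getD (level, pvJoin (toks.take level)) 0 = d := by
        by_contra hc; exact hmem (hiffl.mpr hc)
      rw [if_neg hmem, if_neg (by simp [heq])]

-- B's counter lookups, characterised over the list of splits
theorem pvCounts_getD (input_dict : List (String × String)) (key : Nat × List Char) :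
    (input_dict.foldl (fun (c : PySem.Dict (Nat × List Char) Int) kv =>
        (pvPrefixKeysGo [] 0 (pvSplit kv.2)).foldl (fun c k => c.insert k (c.getD k 0 + 1)) c)
        PySem.Dict.empty).getD key 0 =
      (((input_dict.map (fun kv => pvSplit kv.2)).map
        (fun t => (pvPrefixKeysGo [] 0 t).count key)).sum : Int) := by
  have h1 : ((input_dict.map (fun kv => pvSplit kv.2)).foldl
      (fun (c : PySem.Dict (Nat × List Char) Int) t =>
        (pvPrefixKeysGo [] 0 t).foldl (fun c k => c.insert k (c.getD k 0 + 1)) c)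
      PySem.Dict.empty) =
      (input_dict.foldl (fun (c : PySem.Dict (Nat × List Char) Int) kv =>
        (pvPrefixKeysGo [] 0 (pvSplit kv.2)).foldl (fun c k => c.insert k (c.getD k 0 + 1)) c)
        PySem.Dict.empty) := List.foldl_map
  have h2 : (((input_dict.map (fun kv => pvSplit kv.2)).flatMap (pvPrefixKeysGo [] 0)).foldl
      (fun (c : PySem.Dict (Nat × List Char) Int) k => c.insert k (c.getD k 0 + 1))
      PySem.Dict.empty) =
      ((input_dict.map (fun kv => pvSplit kv.2)).foldl
        (fun (c : PySem.Dict (Nat × List Char) Int) t =>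
          (pvPrefixKeysGo [] 0 t).foldl (fun c k => c.insert k (c.getD k 0 + 1)) c)
        PySem.Dict.empty) := List.foldl_flatMap
  rw [← h1, ← h2, PySem.Dict.getD_foldl_insert_add_one]
  rw [List.count_flatMap]
  simp only [PySem.Dict.getD_empty, zero_add, List.map_map]
  push_cast
  rfl

theorem pvDup_getD (input_dict : List (String × String)) (toks : List (List Char)) :
    (input_dict.foldl (fun (d : PySem.Dict (List (List Char)) Int) kv =>
        d.insert (pvSplit kv.2) (d.getD (pvSplit kv.2) 0 + 1)) PySem.Dict.empty).getD toks 0 =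
      (((input_dict.map (fun kv => pvSplit kv.2)).count toks : Nat) : Int) := by
  have h1 : ((input_dict.map (fun kv => pvSplit kv.2)).foldl
      (fun (d : PySem.Dict (List (List Char)) Int) t => d.insert t (d.getD t 0 + 1))
      PySem.Dict.empty) =
      (input_dict.foldl (fun (d : PySem.Dict (List (List Char)) Int) kv =>
        d.insert (pvSplit kv.2) (d.getD (pvSplit kv.2) 0 + 1)) PySem.Dict.empty) := List.foldl_map
  rw [← h1, PySem.Dict.getD_foldl_insert_add_one]
  simp

-- the per-entry equality of the two loop results
theorem pvEntry_eq (input_dict : List (String × String)) (kv : String × String) :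
    pvALoop (pvSplit kv.2)
        ((input_dict.map (fun kv => pvSplit kv.2)).filter (fun t => t != pvSplit kv.2)) 1
        ((pvSplit kv.2).length - 1) =
      pvBLoop
        (input_dict.foldl (fun (c : PySem.Dict (Nat × List Char) Int) kv =>
          (pvPrefixKeysGo [] 0 (pvSplit kv.2)).foldl (fun c k => c.insert k (c.getD k 0 + 1)) c)
          PySem.Dict.empty)
        (pvSplit kv.2)
        ((input_dict.foldl (fun (d : PySem.Dict (List (List Char)) Int) kv =>
          d.insert (pvSplit kv.2) (d.getD (pvSplit kv.2) 0 + 1)) PySem.Dict.empty).getD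
          (pvSplit kv.2) 0)
        ((pvSplit kv.2).headD []) 1 ((pvSplit kv.2).length - 1) := by
  have hg := pvGood_split kv.2
  have hlen1 : 1 ≤ (pvSplit kv.2).length := by
    cases h : pvSplit kv.2 with
    | nil => exact absurd h hg.1
    | cons a t => simp
  rw [← pvJoin_take_one (pvSplit kv.2) hg.1]
  apply pvLoop_eq _ _ _ _ _ _ 1 (by omega) (by omega)
  intro ℓ h1 hlt
  rw [pvCounts_getD, pvDup_getD]
  rw [Ne, Int.natCast_inj]
  exact pvLevel_iff _ _ ℓ
    (fun t ht => by obtain ⟨kv', _, rfl⟩ := List.mem_map.mp ht; exact pvGood_split _)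
    hg h1 (le_of_lt hlt)

-- ===== VERDICT (by name: the statement is the Claim_ definition above) =====
theorem get_smallest_unique_prefix_dict_spec : Claim_equal_get_smallest_unique_prefix_dict := by
  intro input_dict _
  unfold Spec_get_smallest_unique_prefix_dict
  unfold get_smallest_unique_prefix_dict get_smallest_unique_prefix_dict_alt
  simp only []
  refine congrArg PySem.Dict.items ?_
  refine PySem.List.foldl_congr_mem _ _ _ _ (fun acc kv _ => ?_)
  refine congrArg (acc.insert kv.1) (congrArg String.mk ?_)
  exact pvEntry_eq input_dict kv
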